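-- pv_equiv track=rewrite | github.com/kuntito/LeetcodeGrind | grind__active/237 (number of ways to select buildings)/237a.py | getZerosOnesPrefix
-- ===== SOURCE A (Python) =====
-- def getZerosOnesPrefix(chars):
--     zeroCount, oneCount = 0, 0
--
--     dim = len(chars)
--     arr = [0 for _ in range(dim)]
--
--     for i in range(dim - 1, -1, -1):
--         val = chars[i]
--         if val == '0':
--             zeroCount += 1
--         else:
--             oneCount += 1
--
--         arr[i] = (zeroCount, oneCount)
--
--     return arr
-- ===== SOURCE B (Python) =====
-- def getZerosOnesPrefix(chars):
--     totalZeros = sum(1 for c in chars if c == '0')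
--     totalOnes = len(chars) - totalZeros
--     pz, po = 0, 0
--     res = []
--     for c in chars:
--         res.append((totalZeros - pz, totalOnes - po))
--         if c == '0':
--             pz += 1
--         else:
--             po += 1
--     return res
-- ===== Notes on version B (the rewrite author's own statement) =====
-- stated objective: alternative
-- what changed: A fills the array backward with a running suffix accumulator; B counts total zeros in one pass and then iterates forward, deriving each entry by subtracting the running prefix counts from the totals (ones taken as len - zeros to honour A's else-branch).
import Mathlib
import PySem

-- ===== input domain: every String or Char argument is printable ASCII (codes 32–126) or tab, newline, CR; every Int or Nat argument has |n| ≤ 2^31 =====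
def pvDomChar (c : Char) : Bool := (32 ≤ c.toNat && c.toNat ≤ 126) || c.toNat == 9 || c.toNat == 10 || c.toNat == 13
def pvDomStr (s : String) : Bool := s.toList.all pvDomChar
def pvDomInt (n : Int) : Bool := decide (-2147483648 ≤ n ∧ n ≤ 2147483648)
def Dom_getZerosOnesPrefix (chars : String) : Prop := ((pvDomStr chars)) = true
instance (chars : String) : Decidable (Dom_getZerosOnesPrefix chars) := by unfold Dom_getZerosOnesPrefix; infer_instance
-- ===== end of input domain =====

-- B replaces A's backward suffix accumulator with a forward pass subtracting prefix
-- counts from one-pass totals (objective: alternative decomposition, same cost).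

-- ===== PORT A =====
-- the backward for-loop; the loop index is always in range, so pyGetD's default is never used
-- (Python's arr is initialised with ints 0 but every entry is overwritten with a pair, so
-- initialising with (0, 0) is exact for the returned value)
def pvALoop (cs : List Char) (idxs : List Int) (zc oc : Int) (arr : List (Int × Int)) :
    List (Int × Int) :=
  match idxs with
  | [] => arr
  | i :: rest =>
    let val := PySem.List.pyGetD cs i ' '
    let zc' := if val = '0' then zc + 1 else zc
    let oc' := if val = '0' then oc else oc + 1
    pvALoop cs rest zc' oc' (PySem.List.pySetD arr i (zc', oc'))

def getZerosOnesPrefix (chars : String) : List (Int × Int) :=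
  let cs := chars.toList
  let dim : Int := PySem.List.len cs
  let arr : List (Int × Int) := (PySem.List.pyRange 0 dim 1).map (fun _ => (0, 0))
  pvALoop cs (PySem.List.pyRange (dim - 1) (-1) (-1)) 0 0 arr

-- ===== PORT B =====
-- sum(1 for c in chars if c == '0')
def pvCountZeros (cs : List Char) : Int :=
  cs.foldl (fun acc c => if c = '0' then acc + 1 else acc) 0

-- the forward for-loop building res, carrying the prefix counters pz, po
def pvBLoop (tz tto : Int) : List Char → Int → Int → List (Int × Int)
  | [], _, _ => []
  | c :: rest, pz, po =>
    (tz - pz, tto - po) ::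
      pvBLoop tz tto rest (if c = '0' then pz + 1 else pz) (if c = '0' then po else po + 1)

def getZerosOnesPrefix_alt (chars : String) : List (Int × Int) :=
  let cs := chars.toList
  let totalZeros := pvCountZeros cs
  let totalOnes := PySem.List.len cs - totalZeros
  pvBLoop totalZeros totalOnes cs 0 0

-- ===== PRECONDITION & SPEC =====
def Spec_getZerosOnesPrefix (chars : String) (out : List (Int × Int)) : Prop := out = getZerosOnesPrefix_alt chars
instance (chars : String) (out : List (Int × Int)) : Decidable (Spec_getZerosOnesPrefix chars out) := by unfold Spec_getZerosOnesPrefix; infer_instance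

-- ===== CLAIM (what is proved, stated in full; the proofs are below) =====
def Claim_equal_getZerosOnesPrefix : Prop := ∀ (chars : String), Dom_getZerosOnesPrefix chars → Spec_getZerosOnesPrefix chars (getZerosOnesPrefix chars)

-- ===== LEMMAS AND PROOFS =====

-- common reference: the list of suffix (zeros, ones) counts
def pvZ (cs : List Char) : Int := (cs.countP (· = '0') : Int)
def pvO (cs : List Char) : Int := (cs.countP (· ≠ '0') : Int)

def pvS : List Char → List (Int × Int)
  | [] => []
  | c :: t => (pvZ (c :: t), pvO (c :: t)) :: pvS t

theorem pvS_length (cs : List Char) : (pvS cs).length = cs.length := by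
  induction cs with
  | nil => rfl
  | cons c t ih => simp [pvS, ih]

theorem pvZ_cons (c : Char) (t : List Char) :
    pvZ (c :: t) = (if c = '0' then 1 else 0) + pvZ t := by
  unfold pvZ
  rw [List.countP_cons]
  by_cases h : c = '0' <;> simp [h] <;> push_cast <;> ring

theorem pvO_cons (c : Char) (t : List Char) :
    pvO (c :: t) = (if c = '0' then 0 else 1) + pvO t := by
  unfold pvO
  rw [List.countP_cons]
  by_cases h : c = '0' <;> simp [h] <;> push_cast <;> ring

theorem pvZ_add_pvO (cs : List Char) : pvZ cs + pvO cs = cs.length := by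
  induction cs with
  | nil => simp [pvZ, pvO]
  | cons c t ih => rw [pvZ_cons, pvO_cons]; split_ifs <;> simp <;> omega

theorem pvCountZeros_eq (cs : List Char) : pvCountZeros cs = pvZ cs := by
  have h : ∀ (a : Int), cs.foldl (fun acc c => if c = '0' then acc + 1 else acc) a
      = a + pvZ cs := by
    induction cs with
    | nil => intro a; simp [pvZ]
    | cons c t ih =>
      intro a
      rw [List.foldl_cons, ih, pvZ_cons]
      split_ifs <;> omega
  simpa [pvCountZeros] using h 0

-- B's loop computes the suffix counts
theorem pvBLoop_eq (cs : List Char) : ∀ (tz tto pz po : Int),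
    tz - pz = pvZ cs → tto - po = pvO cs → pvBLoop tz tto cs pz po = pvS cs := by
  induction cs with
  | nil => intro _ _ _ _ _ _; rfl
  | cons c t ih =>
    intro tz tto pz po hz ho
    have hz' : tz - pz = pvZ (c :: t) := hz
    rw [pvZ_cons] at hz'
    have ho' : tto - po = pvO (c :: t) := ho
    rw [pvO_cons] at ho'
    simp only [pvBLoop, pvS]
    congr 1
    · rw [hz, ho]
    · apply ih
      · split_ifs with h <;> simp [h] at hz' ⊢ <;> omega
      · split_ifs with h <;> simp [h] at ho' ⊢ <;> omega

theorem pvS_drop (cs : List Char) : ∀ (k : Nat), pvS (cs.drop k) = (pvS cs).drop k := by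
  induction cs with
  | nil => intro k; simp [pvS]
  | cons c t ih =>
    intro k
    cases k with
    | zero => simp
    | succ k => simpa [pvS] using ih k

theorem pvDropSet {α : Type} (arr : List α) (k : Nat) (v : α) (h : k < arr.length) :
    (arr.set k v).drop k = v :: arr.drop (k + 1) := by
  rw [List.drop_eq_getElem_cons (by simpa using h)]
  rw [List.getElem_set_self]
  rw [List.drop_set_of_lt]
  omega

-- A's loop fills indices k-1 … 0 with the suffix counts, given the counters for the suffix from k
theorem pvALoop_spec (cs : List Char) :
    ∀ (k : Nat) (arr : List (Int × Int)), k ≤ cs.length → arr.length = cs.length →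
    pvALoop cs (PySem.List.pyRange ((k : Int) - 1) (-1) (-1)) (pvZ (cs.drop k)) (pvO (cs.drop k)) arr
      = (pvS cs).take k ++ arr.drop k := by
  intro k
  induction k with
  | zero =>
    intro arr _ _
    rw [PySem.List.pyRange_neg_one_eq_nil (by omega)]
    simp [pvALoop]
  | succ k ih =>
    intro arr hk harr
    have hk' : k < cs.length := by omega
    have hcast : ((k + 1 : Nat) : Int) - 1 = (k : Int) := by push_cast; ring
    rw [hcast, PySem.List.pyRange_neg_one_cons (by omega)]
    simp only [pvALoop]
    have hval : PySem.List.pyGetD cs (k : Int) ' ' = cs[k] :=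
      PySem.List.pyGetD_ofNat cs k ' ' hk'
    have hdropk : cs.drop k = cs[k] :: cs.drop (k + 1) :=
      List.drop_eq_getElem_cons hk'
    have hz : (if cs[k] = '0' then pvZ (cs.drop (k + 1)) + 1 else pvZ (cs.drop (k + 1)))
        = pvZ (cs.drop k) := by
      rw [hdropk, pvZ_cons]; split_ifs <;> omega
    have ho : (if cs[k] = '0' then pvO (cs.drop (k + 1)) else pvO (cs.drop (k + 1)) + 1)
        = pvO (cs.drop k) := by
      rw [hdropk, pvO_cons]; split_ifs <;> omega
    rw [hval, hz, ho]
    rw [show ((k : Int) - 1) = ((k : Nat) : Int) - 1 from rfl]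
    have hset : PySem.List.pySetD arr (k : Int) (pvZ (cs.drop k), pvO (cs.drop k))
        = arr.set k (pvZ (cs.drop k), pvO (cs.drop k)) := by
      simp
    rw [hset, ih _ (by omega) (by simpa using harr)]
    -- head of pvS (cs.drop k) is the entry written at index k
    have hSk : (pvS cs).drop k = (pvZ (cs.drop k), pvO (cs.drop k)) :: (pvS cs).drop (k + 1) := by
      rw [← pvS_drop, ← pvS_drop, hdropk]
      simp [pvS, ← hdropk]
    have hkS : k < (pvS cs).length := by rw [pvS_length]; exact hk'
    have htake : (pvS cs).take (k + 1)
        = (pvS cs).take k ++ [(pvZ (cs.drop k), pvO (cs.drop k))] := by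
      rw [List.take_add_one]
      have h2 := congrArg List.head? hSk
      rw [List.head?_drop] at h2
      simp [h2]
    rw [htake, pvDropSet arr k _ (by omega)]
    simp

theorem pvA_eq (chars : String) : getZerosOnesPrefix chars = pvS chars.toList := by
  unfold getZerosOnesPrefix
  set cs := chars.toList with hcs
  have hlen : ((PySem.List.pyRange 0 (PySem.List.len cs) 1).map
      (fun _ => ((0:Int), (0:Int)))).length = cs.length := by
    simp [PySem.List.length_pyRange_one]
  have h := pvALoop_spec cs cs.length
      ((PySem.List.pyRange 0 (PySem.List.len cs) 1).map (fun _ => ((0:Int), (0:Int))))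
      (le_refl _) hlen
  simp only [List.drop_length, pvZ, pvO, List.countP_nil] at h
  simpa [PySem.List.len, List.take_of_length_le (le_of_eq (pvS_length cs)), hlen] using h

theorem pvB_eq (chars : String) : getZerosOnesPrefix_alt chars = pvS chars.toList := by
  unfold getZerosOnesPrefix_alt
  apply pvBLoop_eq
  · rw [pvCountZeros_eq]; ring
  · rw [pvCountZeros_eq]
    have := pvZ_add_pvO chars.toList
    rw [PySem.List.len_eq]
    omega

-- ===== VERDICT (by name: the statement is the Claim_ definition above) =====
theorem getZerosOnesPrefix_spec : Claim_equal_getZerosOnesPrefix := by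
  intro chars _
  unfold Spec_getZerosOnesPrefix
  rw [pvA_eq, pvB_eq]
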